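-- pv_equiv track=rewrite | github.com/kriserickson/recipe-parser | src/feature_extraction.py | compute_distance_to_nearest_heading
-- ===== SOURCE A (Python) =====
-- def compute_distance_to_nearest_heading(
--     elements: list[dict], idx: int, heading_tags: tuple = ("h1", "h2", "h3", "h4", "h5", "h6")
-- ) -> int:
--     """
--     Compute the distance from the current element to the nearest heading element.
--
--     Parameters
--     ----------
--     elements : list[dict]
--         List of parsed HTML elements.
--     idx : int
--         Index of the current element.
--     heading_tags : tuple, optional
--         Tuple of heading tag names to consider.
--
--     Returns
--     -------
--     int
--         Distance to the nearest heading element, or 9999 if none found.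
--     """
--     # Search backward
--     backward_dist = None
--     for i in range(idx - 1, -1, -1):
--         tag = elements[i].get("tag", "").lower()
--         if tag in heading_tags:
--             backward_dist = idx - i
--             break
--
--     # Search forward
--     forward_dist = None
--     for i in range(idx + 1, len(elements)):
--         tag = elements[i].get("tag", "").lower()
--         if tag in heading_tags:
--             forward_dist = i - idx
--             break
--
--     distances = [d for d in [backward_dist, forward_dist] if d is not None]
--     if not distances:
--         return 9999  # no heading found nearby
--     return min(distances)
-- ===== SOURCE B (Python) =====
-- def compute_distance_to_nearest_heading(
--     elements: list[dict], idx: int, heading_tags: tuple = ("h1", "h2", "h3", "h4", "h5", "h6")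
-- ) -> int:
--     """Ring search: widen the distance d from idx one step at a time and return the
--     first d whose backward (idx-d, while >= 0) or forward (idx+d, while < len)
--     probe is a heading element."""
--     n = len(elements)
--     d = 1
--     while idx - d >= 0 or idx + d < n:
--         if idx - d >= 0 and elements[idx - d].get("tag", "").lower() in heading_tags:
--             return d
--         if idx + d < n and elements[idx + d].get("tag", "").lower() in heading_tags:
--             return d
--         d += 1
--     return 9999
-- ===== Notes on version B (the rewrite author's own statement) =====
-- stated objective: alternative
-- what changed: Replaces A's two independent directional scans (full backward scan, full forward scan, then min of the two hits) with a single ring-search loop over increasing distance d that probes idx-d and idx+d and returns the first d that hits a heading.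
import Mathlib
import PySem

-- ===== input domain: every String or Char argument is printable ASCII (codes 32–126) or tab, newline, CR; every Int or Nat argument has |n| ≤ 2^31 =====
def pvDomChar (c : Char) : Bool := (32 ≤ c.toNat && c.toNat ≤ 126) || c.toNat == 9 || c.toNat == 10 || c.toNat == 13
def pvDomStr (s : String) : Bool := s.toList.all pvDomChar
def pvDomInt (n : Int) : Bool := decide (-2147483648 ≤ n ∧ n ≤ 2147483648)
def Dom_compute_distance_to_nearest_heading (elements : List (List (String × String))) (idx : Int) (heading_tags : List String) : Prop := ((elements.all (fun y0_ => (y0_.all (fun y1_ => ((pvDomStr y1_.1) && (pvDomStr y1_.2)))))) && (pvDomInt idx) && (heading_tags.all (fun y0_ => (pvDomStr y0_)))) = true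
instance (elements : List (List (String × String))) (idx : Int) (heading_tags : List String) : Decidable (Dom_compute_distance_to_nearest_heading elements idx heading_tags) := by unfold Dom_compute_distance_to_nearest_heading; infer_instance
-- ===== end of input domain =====

-- B replaces A's two independent directional scans by a single ring-search loop over
-- increasing distance d (objective: alternative decomposition, same O(n) cost).

-- ===== PORT A =====
-- elements[i].get("tag", "").lower()  (shared accessor; pyGet? is Python indexing,
-- negative i counting from the end; its getD [] default is only reachable outside Pre_,
-- where Python raises IndexError)
def pvTag (elements : List (List (String × String))) (i : Int) : String :=
  PySem.Str.lower (PySem.Dict.getD (PySem.Dict.ofList ((PySem.List.pyGet? elements i).getD [])) "tag" "")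

-- the backward for-loop with break: first i whose tag is a heading yields idx - i
def pvBackScan (elements : List (List (String × String))) (heading_tags : List String) (idx : Int) : List Int → Option Int
  | [] => none
  | i :: rest =>
      if heading_tags.contains (pvTag elements i) = true then some (idx - i)
      else pvBackScan elements heading_tags idx rest

-- the forward for-loop with break: first i whose tag is a heading yields i - idx
def pvFwdScan (elements : List (List (String × String))) (heading_tags : List String) (idx : Int) : List Int → Option Int
  | [] => none
  | i :: rest =>
      if heading_tags.contains (pvTag elements i) = true then some (i - idx)
      else pvFwdScan elements heading_tags idx rest

def compute_distance_to_nearest_heading (elements : List (List (String × String))) (idx : Int) (heading_tags : List String) : Int :=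
  let backward_dist := pvBackScan elements heading_tags idx (PySem.List.pyRange (idx - 1) (-1) (-1))
  let forward_dist := pvFwdScan elements heading_tags idx (PySem.List.pyRange (idx + 1) (PySem.List.len elements) 1)
  let distances := [backward_dist, forward_dist].filterMap id
  if distances = [] then 9999
  else (PySem.List.min? distances (fun x => x)).getD 9999

-- ===== PORT B =====
-- the while loop of Source B; the Nat argument is a totality fuel only (always large enough)
def pvRing (elements : List (List (String × String))) (heading_tags : List String) (idx n : Int) : Nat → Int → Int
  | 0, _ => 9999
  | fuel + 1, d =>
      if idx - d ≥ 0 ∨ idx + d < n then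
        if idx - d ≥ 0 ∧ heading_tags.contains (pvTag elements (idx - d)) = true then d
        else if idx + d < n ∧ heading_tags.contains (pvTag elements (idx + d)) = true then d
        else pvRing elements heading_tags idx n fuel (d + 1)
      else 9999

def compute_distance_to_nearest_heading_alt (elements : List (List (String × String))) (idx : Int) (heading_tags : List String) : Int :=
  pvRing elements heading_tags idx (PySem.List.len elements) (idx.natAbs + elements.length + 2) 1

-- ===== PRECONDITION & SPEC =====
-- Pre_ excludes exactly the inputs on which Python A raises IndexError (its first element
-- access is out of range when idx > len(elements) or idx < -len(elements)-1); Python B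
-- raises IndexError on exactly the same inputs.
def Pre_compute_distance_to_nearest_heading (elements : List (List (String × String))) (idx : Int) (heading_tags : List String) : Prop :=
  -(elements.length : Int) - 1 ≤ idx ∧ idx ≤ (elements.length : Int)
instance (elements : List (List (String × String))) (idx : Int) (heading_tags : List String) : Decidable (Pre_compute_distance_to_nearest_heading elements idx heading_tags) := by unfold Pre_compute_distance_to_nearest_heading; infer_instance

def pvWitness_compute_distance_to_nearest_heading : (List (List (String × String))) × Int × List String :=
  ([[("tag", "p")], [("tag", "h1")]], 0, ["h1", "h2"])

def Spec_compute_distance_to_nearest_heading (elements : List (List (String × String))) (idx : Int) (heading_tags : List String) (out : Int) : Prop := out = compute_distance_to_nearest_heading_alt elements idx heading_tags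
instance (elements : List (List (String × String))) (idx : Int) (heading_tags : List String) (out : Int) : Decidable (Spec_compute_distance_to_nearest_heading elements idx heading_tags out) := by unfold Spec_compute_distance_to_nearest_heading; infer_instance

-- ===== CLAIM (what is proved, stated in full; the proofs are below) =====
def Claim_equal_compute_distance_to_nearest_heading : Prop := ∀ (elements : List (List (String × String))) (idx : Int) (heading_tags : List String), Dom_compute_distance_to_nearest_heading elements idx heading_tags → Pre_compute_distance_to_nearest_heading elements idx heading_tags → Spec_compute_distance_to_nearest_heading elements idx heading_tags (compute_distance_to_nearest_heading elements idx heading_tags)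

-- ===== LEMMAS AND PROOFS =====

-- min of the up-to-two found distances, as A's tail computes it
def pvCombine : Option Int → Option Int → Int
  | none, none => 9999
  | some a, none => a
  | none, some b => b
  | some a, some b => min a b

lemma pvBackScan_bound (elements : List (List (String × String))) (heading_tags : List String) (idx : Int) (l : List Int) (v : Int) (h : pvBackScan elements heading_tags idx l = some v) : ∃ i ∈ l, v = idx - i := by
  induction l with
  | nil => simp [pvBackScan] at h
  | cons i rest ih =>
      rw [pvBackScan] at h
      split at h
      · simp only [Option.some.injEq] at h
        exact ⟨i, by simp, h.symm⟩
      · obtain ⟨j, hj, hv⟩ := ih h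
        exact ⟨j, by simp [hj], hv⟩

lemma pvFwdScan_bound (elements : List (List (String × String))) (heading_tags : List String) (idx : Int) (l : List Int) (v : Int) (h : pvFwdScan elements heading_tags idx l = some v) : ∃ i ∈ l, v = i - idx := by
  induction l with
  | nil => simp [pvFwdScan] at h
  | cons i rest ih =>
      rw [pvFwdScan] at h
      split at h
      · simp only [Option.some.injEq] at h
        exact ⟨i, by simp, h.symm⟩
      · obtain ⟨j, hj, hv⟩ := ih h
        exact ⟨j, by simp [hj], hv⟩

lemma pvRing_eq (elements : List (List (String × String))) (heading_tags : List String) (idx n : Int) (fuel : Nat) (d : Int) (hd : 1 ≤ d) (hfuel : (idx + 1 - d).toNat + (n - idx - d).toNat < fuel) :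
    pvRing elements heading_tags idx n fuel d =
      pvCombine (pvBackScan elements heading_tags idx (PySem.List.pyRange (idx - d) (-1) (-1)))
                (pvFwdScan elements heading_tags idx (PySem.List.pyRange (idx + d) n 1)) := by
  induction fuel generalizing d with
  | zero => omega
  | succ fuel ih =>
      rw [pvRing]
      by_cases hc : idx - d ≥ 0 ∨ idx + d < n
      · rw [if_pos hc]
        by_cases hb : idx - d ≥ 0 ∧ heading_tags.contains (pvTag elements (idx - d)) = true
        · rw [if_pos hb]
          rw [PySem.List.pyRange_neg_one_cons (show (-1 : Int) < idx - d by omega)]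
          rw [pvBackScan, if_pos hb.2]
          cases hF : pvFwdScan elements heading_tags idx (PySem.List.pyRange (idx + d) n 1) with
          | none => simp [pvCombine]; try omega
          | some v =>
              obtain ⟨i, hi, hv⟩ := pvFwdScan_bound _ _ _ _ _ hF
              rw [PySem.List.mem_pyRange_one] at hi
              simp [pvCombine]; try omega
        · rw [if_neg hb]
          by_cases hf : idx + d < n ∧ heading_tags.contains (pvTag elements (idx + d)) = true
          · rw [if_pos hf]
            rw [PySem.List.pyRange_one_cons hf.1]
            rw [pvFwdScan, if_pos hf.2]
            by_cases hbz : 0 ≤ idx - d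
            · -- backward range nonempty; its head fails, tail values are all > d
              have hcont : ¬ heading_tags.contains (pvTag elements (idx - d)) = true := by
                intro hcc; exact hb ⟨hbz, hcc⟩
              rw [PySem.List.pyRange_neg_one_cons (show (-1 : Int) < idx - d by omega)]
              rw [pvBackScan, if_neg hcont]
              cases hB : pvBackScan elements heading_tags idx (PySem.List.pyRange (idx - d - 1) (-1) (-1)) with
              | none => simp [pvCombine]; try omega
              | some v =>
                  obtain ⟨i, hi, hv⟩ := pvBackScan_bound _ _ _ _ _ hB
                  rw [PySem.List.mem_pyRange_neg_one] at hi
                  simp [pvCombine]; try omega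
            · rw [PySem.List.pyRange_neg_one_eq_nil (show idx - d ≤ -1 by omega)]
              simp [pvBackScan, pvCombine]; try omega
          · rw [if_neg hf]
            have hbd : pvBackScan elements heading_tags idx (PySem.List.pyRange (idx - d) (-1) (-1)) = pvBackScan elements heading_tags idx (PySem.List.pyRange (idx - (d + 1)) (-1) (-1)) := by
              by_cases hbz : 0 ≤ idx - d
              · have hcont : ¬ heading_tags.contains (pvTag elements (idx - d)) = true := by
                  intro hcc; exact hb ⟨hbz, hcc⟩
                rw [PySem.List.pyRange_neg_one_cons (show (-1 : Int) < idx - d by omega)]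
                rw [pvBackScan, if_neg hcont]
                have harith : idx - d - 1 = idx - (d + 1) := by omega
                rw [harith]
              · rw [PySem.List.pyRange_neg_one_eq_nil (show idx - d ≤ -1 by omega),
                    PySem.List.pyRange_neg_one_eq_nil (show idx - (d + 1) ≤ -1 by omega)]
            have hfd : pvFwdScan elements heading_tags idx (PySem.List.pyRange (idx + d) n 1) = pvFwdScan elements heading_tags idx (PySem.List.pyRange (idx + (d + 1)) n 1) := by
              by_cases hfz : idx + d < n
              · have hcont : ¬ heading_tags.contains (pvTag elements (idx + d)) = true := by
                  intro hcc; exact hf ⟨hfz, hcc⟩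
                rw [PySem.List.pyRange_one_cons hfz]
                rw [pvFwdScan, if_neg hcont]
                have harith : idx + d + 1 = idx + (d + 1) := by omega
                rw [harith]
              · rw [PySem.List.pyRange_one_eq_nil (show n ≤ idx + d by omega),
                    PySem.List.pyRange_one_eq_nil (show n ≤ idx + (d + 1) by omega)]
            rw [hbd, hfd]
            exact ih (d + 1) (by omega) (by rcases hc with hc | hc <;> omega)
      · rw [if_neg hc]
        rw [PySem.List.pyRange_neg_one_eq_nil (by omega), PySem.List.pyRange_one_eq_nil (by omega)]
        simp [pvBackScan, pvFwdScan, pvCombine]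

lemma pvA_eq_combine (elements : List (List (String × String))) (idx : Int) (heading_tags : List String) :
    compute_distance_to_nearest_heading elements idx heading_tags =
      pvCombine (pvBackScan elements heading_tags idx (PySem.List.pyRange (idx - 1) (-1) (-1)))
                (pvFwdScan elements heading_tags idx (PySem.List.pyRange (idx + 1) (PySem.List.len elements) 1)) := by
  unfold compute_distance_to_nearest_heading
  cases hB : pvBackScan elements heading_tags idx (PySem.List.pyRange (idx - 1) (-1) (-1)) with
  | none =>
      cases hF : pvFwdScan elements heading_tags idx (PySem.List.pyRange (idx + 1) (PySem.List.len elements) 1) with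
      | none => simp [pvCombine]
      | some b => simp [pvCombine, PySem.List.min?_id_cons]
  | some a =>
      cases hF : pvFwdScan elements heading_tags idx (PySem.List.pyRange (idx + 1) (PySem.List.len elements) 1) with
      | none => simp [pvCombine, PySem.List.min?_id_cons]
      | some b => simp [pvCombine, PySem.List.min?_id_cons]

-- ===== VERDICT (by name: the statement is the Claim_ definition above) =====
theorem compute_distance_to_nearest_heading_spec : Claim_equal_compute_distance_to_nearest_heading := by
  intro elements idx heading_tags _ _
  unfold Spec_compute_distance_to_nearest_heading compute_distance_to_nearest_heading_alt
  rw [pvRing_eq elements heading_tags idx (PySem.List.len elements)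
        (idx.natAbs + elements.length + 2) 1 (by omega) (by simp [PySem.List.len_eq]; omega)]
  simpa using pvA_eq_combine elements idx heading_tags
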